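-- pv_equiv track=rewrite | github.com/Gypsophilazd/RCS-Radar_SDR-Gypsophila | fsk_digital_twin.py | slice_symbols
-- ===== SOURCE A (Python) =====
-- def slice_symbols(symbols):
--     """
--     Convert analog symbols to digital bits
--     Thresholds: -2, 0, +2 (midpoints between -3, -1, +1, +3)
--     """
--     bits = []
--     for sym in symbols:
--         if sym < -2:
--             bits.extend([0, 0])  # -3
--         elif sym < 0:
--             bits.extend([0, 1])  # -1
--         elif sym < 2:
--             bits.extend([1, 0])  # +1
--         else:
--             bits.extend([1, 1])  # +3
--     return bits
-- ===== SOURCE B (Python) =====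
-- def slice_symbols(symbols):
--     bits = []
--     for sym in symbols:
--         level = sum(1 for t in (-2, 0, 2) if not (sym < t))
--         bits.extend(divmod(level, 2))
--     return bits
-- ===== Notes on version B (the rewrite author's own statement) =====
-- stated objective: alternative
-- what changed: Replaces the explicit 4-way comparison ladder with computing an integer level (count of thresholds not exceeding the symbol) and decoding the two bits arithmetically via divmod(level, 2).
import Mathlib
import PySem

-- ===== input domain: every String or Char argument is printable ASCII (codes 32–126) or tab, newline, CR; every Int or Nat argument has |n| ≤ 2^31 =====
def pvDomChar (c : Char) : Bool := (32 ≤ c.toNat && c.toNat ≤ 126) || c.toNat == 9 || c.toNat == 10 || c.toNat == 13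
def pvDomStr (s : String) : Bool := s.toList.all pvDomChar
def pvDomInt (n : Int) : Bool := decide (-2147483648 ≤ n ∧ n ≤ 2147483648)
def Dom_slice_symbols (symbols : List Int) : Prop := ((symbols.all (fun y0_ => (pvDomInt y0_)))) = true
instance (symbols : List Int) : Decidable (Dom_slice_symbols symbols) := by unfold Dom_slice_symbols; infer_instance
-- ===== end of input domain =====

-- B replaces A's explicit 4-way comparison ladder with a counted level plus an
-- arithmetic divmod bit decode (alternative decomposition, same cost).
-- ===== PORT A =====
def slice_symbols (symbols : List Int) : List Int :=
  symbols.foldl (fun bits sym =>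
    if sym < -2 then bits ++ [0, 0]
    else if sym < 0 then bits ++ [0, 1]
    else if sym < 2 then bits ++ [1, 0]
    else bits ++ [1, 1]) []

-- ===== PORT B =====
def slice_symbols_alt (symbols : List Int) : List Int :=
  symbols.foldl (fun bits sym =>
    let level : Int :=
      ([(-2 : Int), 0, 2].foldl (fun acc t => if ¬ (sym < t) then acc + 1 else acc) 0)
    bits ++ [PySem.Int.floordiv level 2, PySem.Int.mod level 2]) []

-- ===== PRECONDITION & SPEC =====
def Spec_slice_symbols (symbols : List Int) (out : List Int) : Prop := out = slice_symbols_alt symbols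
instance (symbols : List Int) (out : List Int) : Decidable (Spec_slice_symbols symbols out) := by unfold Spec_slice_symbols; infer_instance

-- ===== CLAIM (what is proved, stated in full; the proofs are below) =====
def Claim_equal_slice_symbols : Prop := ∀ (symbols : List Int), Dom_slice_symbols symbols → Spec_slice_symbols symbols (slice_symbols symbols)

-- ===== LEMMAS AND PROOFS =====

-- ===== VERDICT (by name: the statement is the Claim_ definition above) =====
theorem step_eq (sym : Int) (bits : List Int) :
    (if sym < -2 then bits ++ [0, 0]
     else if sym < 0 then bits ++ [0, 1]
     else if sym < 2 then bits ++ [1, 0]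
     else bits ++ ([1, 1] : List Int)) =
    (bits ++ [PySem.Int.floordiv
        ([(-2 : Int), 0, 2].foldl (fun acc t => if ¬ (sym < t) then acc + 1 else acc) 0) 2,
      PySem.Int.mod
        ([(-2 : Int), 0, 2].foldl (fun acc t => if ¬ (sym < t) then acc + 1 else acc) 0) 2]) := by
  simp only [List.foldl]
  by_cases h1 : sym < -2 <;> by_cases h2 : sym < 0 <;> by_cases h3 : sym < 2 <;>
    simp [h1, h2, h3, PySem.Int.floordiv, PySem.Int.mod] <;> omega

theorem foldl_eq (symbols : List Int) (bits : List Int) :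
    symbols.foldl (fun bits sym =>
      if sym < -2 then bits ++ [0, 0]
      else if sym < 0 then bits ++ [0, 1]
      else if sym < 2 then bits ++ [1, 0]
      else bits ++ [1, 1]) bits =
    symbols.foldl (fun bits sym =>
      let level : Int :=
        ([(-2 : Int), 0, 2].foldl (fun acc t => if ¬ (sym < t) then acc + 1 else acc) 0)
      bits ++ [PySem.Int.floordiv level 2, PySem.Int.mod level 2]) bits := by
  induction symbols generalizing bits with
  | nil => rfl
  | cons sym rest ih =>
      rw [List.foldl_cons, List.foldl_cons, ← step_eq]
      exact ih _

theorem slice_symbols_spec : Claim_equal_slice_symbols := by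
  intro symbols _
  unfold Spec_slice_symbols slice_symbols slice_symbols_alt
  exact foldl_eq symbols []
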